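-- pv_equiv track=rewrite | github.com/keegansmith21/aoc | 2023/day_11/day_11.py | expand_g_map
-- ===== SOURCE A (Python) =====
-- def is_that_need_expanding(g_map):
--     rows_to_expand = []
--     for i, r in enumerate(g_map):
--         if set(r) == set(["."]):
--             rows_to_expand.append(i)
--
--     cols_to_expand = []
--     row_col_swap = list(map(list, zip(*g_map)))
--     for i, c in enumerate(row_col_swap):
--         if set(c) == set(["."]):
--             cols_to_expand.append(i)
--     return rows_to_expand, cols_to_expand
--
-- def expand_g_map(g_map):
--     expanded_g_map = g_map.copy()
--     rows_to_expand, cols_to_expand = is_that_need_expanding(expanded_g_map)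
--
--     for r in sorted(rows_to_expand, reverse=True):
--         expanded_g_map.insert(r, ["." for _ in range(len(expanded_g_map[0]))])
--
--     for c in sorted(cols_to_expand, reverse=True):
--         for r in expanded_g_map:
--             r.insert(c, ".")
--
--     return expanded_g_map
-- ===== SOURCE B (Python) =====
-- # Single-pass rebuild: precompute empty-row indices and empty-column indices once,
-- # then emit each (possibly duplicated) row with dots interleaved at the empty columns.
-- # Unlike A, B does not mutate the caller's row lists; return values agree.
-- def expand_g_map(g_map):
--     empty_rows = [i for i, r in enumerate(g_map) if r and all(x == "." for x in r)]
--     m = min((len(r) for r in g_map), default=0)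
--     empty_cols = [j for j in range(m) if all(r[j] == "." for r in g_map)]
--     blank = ["."] * (len(g_map[0]) if g_map else 0)
--
--     def widen(row):
--         out = []
--         for j, x in enumerate(row):
--             if j in empty_cols:
--                 out.append(".")
--             out.append(x)
--         return out
--
--     res = []
--     for i, row in enumerate(g_map):
--         if i in empty_rows:
--             res.append(widen(blank))
--         res.append(widen(row))
--     return res
-- ===== Notes on version B (the rewrite author's own statement) =====
-- stated objective: alternative
-- what changed: B precomputes the empty-row and empty-column index lists once and rebuilds the grid in a single pass, interleaving dot columns and duplicated blank rows, instead of A's repeated in-place list.insert passes over the grid and each row.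
import Mathlib
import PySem

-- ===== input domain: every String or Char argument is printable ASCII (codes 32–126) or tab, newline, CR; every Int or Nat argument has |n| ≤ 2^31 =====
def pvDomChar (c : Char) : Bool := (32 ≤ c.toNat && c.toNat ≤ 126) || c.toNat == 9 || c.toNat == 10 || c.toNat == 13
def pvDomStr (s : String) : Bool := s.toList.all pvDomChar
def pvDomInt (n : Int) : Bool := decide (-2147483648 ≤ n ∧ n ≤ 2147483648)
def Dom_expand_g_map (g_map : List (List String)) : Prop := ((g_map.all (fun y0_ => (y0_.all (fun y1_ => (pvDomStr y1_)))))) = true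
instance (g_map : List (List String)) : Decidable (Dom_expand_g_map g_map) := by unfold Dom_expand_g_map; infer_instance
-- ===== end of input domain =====

-- B rebuilds the grid in one pass from precomputed empty-row/empty-column index lists,
-- instead of A's repeated in-place list.insert passes (A also mutates the caller's row
-- lists in place; the equivalence proved here is about the return value).

-- ===== PORT A =====
-- min of the row lengths (used to model Python's zip truncation; also B's explicit min)
def pvMinLen (g : List (List String)) : Nat :=
  match g with
  | [] => 0
  | r :: rs => rs.foldl (fun a r' => min a r'.length) r.length

-- list(map(list, zip(*g_map))): Python zip truncates to the shortest row; exact model —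
-- column j (j < min row length) is the j-th element of every row, in row order.
def pyZipStar (d : String) (g : List (List String)) : List (List String) :=
  match g with
  | [] => []
  | r :: rs => (List.range (pvMinLen (r :: rs))).map (fun j => (r :: rs).map (fun row => row.getD j d))

def is_that_need_expanding (g_map : List (List String)) : List Int × List Int :=
  let rows_to_expand : List Int := (PySem.List.enumerate g_map 0).foldl
    (fun acc p => if PySem.Set.equal (PySem.Set.ofList p.2) (PySem.Set.ofList ["."]) then acc ++ [p.1] else acc) []
  let row_col_swap := pyZipStar "" g_map
  let cols_to_expand : List Int := (PySem.List.enumerate row_col_swap 0).foldl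
    (fun acc p => if PySem.Set.equal (PySem.Set.ofList p.2) (PySem.Set.ofList ["."]) then acc ++ [p.1] else acc) []
  (rows_to_expand, cols_to_expand)

def expand_g_map (g_map : List (List String)) : List (List String) :=
  let expanded₀ := g_map
  let rc := is_that_need_expanding expanded₀
  -- expanded_g_map[0] is only evaluated when this loop runs, i.e. on a nonempty grid;
  -- pyGetD with default [] is exact there (index 0 never raises on a nonempty list)
  let expanded₁ := (PySem.List.sorted rc.1 (fun x => x) true).foldl
    (fun eg r => PySem.List.insert eg r
      ((List.range (PySem.List.pyGetD eg 0 []).length).map (fun _ => "."))) expanded₀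
  let expanded₂ := (PySem.List.sorted rc.2 (fun x => x) true).foldl
    (fun eg c => eg.map (fun r => PySem.List.insert r c ".")) expanded₁
  expanded₂

-- ===== PORT B =====
def pvWiden (empty_cols : List Int) (row : List String) : List String :=
  (PySem.List.enumerate row 0).foldl
    (fun out p => (if empty_cols.contains p.1 then out ++ ["."] else out) ++ [p.2]) []

def expand_g_map_alt (g_map : List (List String)) : List (List String) :=
  let empty_rows : List Int := (PySem.List.enumerate g_map 0).filterMap
    (fun p => if !p.2.isEmpty && p.2.all (fun x => x == ".") then some p.1 else none)
  let m : Nat := pvMinLen g_map   -- min((len(r) for r in g_map), default=0)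
  -- r[j] is exact as pyGetD here: every j drawn from range(m) is in range for every row
  let empty_cols : List Int := (PySem.List.pyRange 0 (m : Int)).filter
    (fun j => g_map.all (fun r => PySem.List.pyGetD r j "" == "."))
  -- len(g_map[0]) if g_map else 0: the head's length, 0 for the empty grid
  let blank : List String := List.replicate (g_map.headD []).length "."
  (PySem.List.enumerate g_map 0).foldl
    (fun res p => (if empty_rows.contains p.1 then res ++ [pvWiden empty_cols blank] else res)
      ++ [pvWiden empty_cols p.2]) []

-- ===== PRECONDITION & SPEC =====
def Spec_expand_g_map (g_map : List (List String)) (out : List (List String)) : Prop := out = expand_g_map_alt g_map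
instance (g_map : List (List String)) (out : List (List String)) : Decidable (Spec_expand_g_map g_map out) := by unfold Spec_expand_g_map; infer_instance

-- ===== CLAIM (what is proved, stated in full; the proofs are below) =====
def Claim_equal_expand_g_map : Prop := ∀ (g_map : List (List String)), Dom_expand_g_map g_map → Spec_expand_g_map g_map (expand_g_map g_map)

-- ===== LEMMAS AND PROOFS =====

-- canonical "widen with markers": before the element at position j (counting from the
-- offset), emit u when P j; every element goes through f
def wgen {α β : Type} (u : β) (P : Int → Bool) (f : α → β) : Int → List α → List β
  | _, [] => []
  | j, x :: t => (if P j then [u] else []) ++ f x :: wgen u P f (j+1) t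

theorem wgen_length_ge {α β : Type} (u : β) (P : Int → Bool) (f : α → β) :
    ∀ (j : Int) (xs : List α), xs.length ≤ (wgen u P f j xs).length := by
  intro j xs
  induction xs generalizing j with
  | nil => simp [wgen]
  | cons x t ih =>
    simp only [wgen, List.length_append, List.length_cons]
    have := ih (j+1)
    split <;> simp <;> omega

theorem mem_wgen {α : Type} (u : α) (P : Int → Bool) :
    ∀ (j : Int) (xs : List α) (y : α), y ∈ wgen u P id j xs → y = u ∨ y ∈ xs := by
  intro j xs
  induction xs generalizing j with
  | nil => simp [wgen]
  | cons x t ih =>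
    intro y hy
    simp only [wgen] at hy
    by_cases hp : P j
    · simp [hp] at hy
      rcases hy with rfl | rfl | hy
      · exact Or.inl rfl
      · exact Or.inr (List.mem_cons_self ..)
      · rcases ih (j+1) y hy with h' | h'
        · exact Or.inl h'
        · exact Or.inr (List.mem_cons_of_mem _ h')
    · simp [hp] at hy
      rcases hy with rfl | hy
      · exact Or.inr (List.mem_cons_self ..)
      · rcases ih (j+1) y hy with h' | h'
        · exact Or.inl h'
        · exact Or.inr (List.mem_cons_of_mem _ h')

-- B's loops over enumerate are wgen
theorem foldl_enum_wgen {α β : Type} (u : β) (P : Int → Bool) (f : α → β) :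
    ∀ (xs : List α) (j : Int) (acc : List β),
      (PySem.List.enumerate xs j).foldl
        (fun out p => (if P p.1 then out ++ [u] else out) ++ [f p.2]) acc
      = acc ++ wgen u P f j xs := by
  intro xs
  induction xs with
  | nil => intro j acc; simp [PySem.List.enumerate_nil, wgen]
  | cons x t ih =>
    intro j acc
    rw [PySem.List.enumerate_cons]
    simp only [List.foldl_cons, ih]
    simp [wgen]
    split <;> simp

-- mapping over a marker-free wgen pushes through
theorem map_wgen {α β : Type} (u : α) (P : Int → Bool) (F : α → β) :
    ∀ (j : Int) (xs : List α), (wgen u P id j xs).map F = wgen (F u) P F j xs := by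
  intro j xs
  induction xs generalizing j with
  | nil => simp [wgen]
  | cons x t ih => simp only [wgen]; split <;> simp [ih]

-- an index below the offset never fires
theorem wgen_contains_cons_lt {α : Type} (u : α) (c : Int) (cs : List Int) :
    ∀ (xs : List α) (j : Int), c < j →
      wgen u (fun i => (c :: cs).contains i) id j xs = wgen u (fun i => cs.contains i) id j xs := by
  intro xs
  induction xs with
  | nil => intro j _; rfl
  | cons x t ih =>
    intro j hj
    simp only [wgen]
    have h1 : ((c :: cs).contains j) = (cs.contains j) := by
      simp only [List.contains_cons]
      have : (j == c) = false := by simp; omega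
      simp [this]
    rw [ih (j+1) (by omega)]
    have hne : ¬ j = c := by omega
    simp [hne]

theorem wgen_false {α : Type} (u : α) :
    ∀ (j : Int) (xs : List α), wgen u (fun _ => false) id j xs = xs := by
  intro j xs
  induction xs generalizing j with
  | nil => rfl
  | cons x t ih => simp [wgen, ih]

theorem wgen_contains_nil {α : Type} (u : α) :
    ∀ (j : Int) (xs : List α), wgen u (fun i => ([] : List Int).contains i) id j xs = xs := by
  have h : (fun i => ([] : List Int).contains i) = (fun _ : Int => false) := rfl
  rw [h]
  exact wgen_false u

-- python insert at a valid relative position into a wgen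
theorem insert_wgen {α : Type} (u : α) :
    ∀ (xs : List α) (k : Nat) (j : Int) (cs : List Int),
      (∀ c' ∈ cs, j + k < c') → k < xs.length →
      PySem.List.insert (wgen u (fun i => cs.contains i) id j xs) (k : Int) u
        = wgen u (fun i => ((j + k) :: cs).contains i) id j xs := by
  intro xs
  induction xs with
  | nil => intro k j cs _ hk; simp at hk
  | cons x t ih =>
    intro k j cs hcs hk
    match k with
    | 0 =>
      have hz : j + ((0 : Nat) : Int) = j := by simp
      rw [hz, show ((0 : Nat) : Int) = 0 from rfl, PySem.List.insert_zero]
      have hnc : (cs.contains j) = false := by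
        simp only [List.contains_eq_mem, decide_eq_false_iff_not]
        intro hmem; have := hcs j hmem; omega
      have hnc2 : ((j :: cs).contains j) = true := by simp
      simp only [wgen, hnc, hnc2, if_true]
      rw [wgen_contains_cons_lt u j cs t (j+1) (by omega)]
      simp
    | k' + 1 =>
      have hnc : (cs.contains j) = false := by
        simp only [List.contains_eq_mem, decide_eq_false_iff_not]
        intro hmem; have := hcs j hmem; omega
      have hnc2 : (((j + ((k' + 1 : Nat) : Int)) :: cs).contains j) = false := by
        have h1 : ¬ j = j + ((k' + 1 : Nat) : Int) := by push_cast; omega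
        have h2 : ¬ j ∈ cs := by intro hmem; have := hcs j hmem; omega
        simp [h2]
        omega
      simp only [wgen, hnc, hnc2, Bool.false_eq_true, if_false, List.nil_append, id_eq]
      -- insert (x :: L) (k'+1) u = x :: insert L k' u where L = wgen cs (j+1) t
      have hlen : k' ≤ (wgen u (fun i => cs.contains i) id (j+1) t).length := by
        have := wgen_length_ge u (fun i => cs.contains i) id (j+1) t
        simp at hk; omega
      have hins : PySem.List.insert (x :: wgen u (fun i => cs.contains i) id (j+1) t)
          (((k' + 1 : Nat)) : Int) u
          = x :: PySem.List.insert (wgen u (fun i => cs.contains i) id (j+1) t) ((k' : Nat) : Int) u := by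
        rw [PySem.List.insert_natCast _ (k' + 1) _ (by simpa using Nat.succ_le_succ hlen),
            PySem.List.insert_natCast _ k' _ hlen]
        simp [List.take_succ_cons, List.drop_succ_cons]
      rw [hins, ih k' (j+1) cs (by intro c' hc'; have := hcs c' hc'; push_cast at *; omega)
        (by simp at hk; omega)]
      have hje : (j + 1 + (k' : Int)) = j + ((k' + 1 : Nat) : Int) := by push_cast; ring
      rw [hje]

-- descending python inserts at strictly increasing valid positions build a wgen
theorem foldr_insert_wgen {α : Type} (u : α) :
    ∀ (cs : List Int) (xs : List α), cs.Pairwise (· < ·) →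
      (∀ c ∈ cs, 0 ≤ c ∧ c < (xs.length : Int)) →
      cs.foldr (fun c acc => PySem.List.insert acc c u) xs
        = wgen u (fun i => cs.contains i) id 0 xs := by
  intro cs
  induction cs with
  | nil => intro xs _ _; simp only [List.foldr_nil]; exact (wgen_contains_nil u 0 xs).symm
  | cons c cs' ih =>
    intro xs hp hb
    have hp' := (List.pairwise_cons.1 hp).2
    have hlt := (List.pairwise_cons.1 hp).1
    have hb' : ∀ c' ∈ cs', 0 ≤ c' ∧ c' < (xs.length : Int) := fun c' h => hb c' (List.mem_cons_of_mem _ h)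
    have hc := hb c (List.mem_cons_self ..)
    obtain ⟨n, rfl⟩ : ∃ n : Nat, c = (n : Int) := ⟨c.toNat, by omega⟩
    simp only [List.foldr_cons, ih xs hp' hb']
    rw [insert_wgen u xs n 0 cs'
      (by intro c' hc'; have := hlt c' hc'; push_cast at *; omega)
      (by omega)]
    simp

-- the column loop over the grid distributes to the rows
theorem foldr_map_insert {α : Type} (v : α) :
    ∀ (cs : List Int) (G : List (List α)),
      cs.foldr (fun c eg => eg.map (fun r => PySem.List.insert r c v)) G
        = G.map (fun r => cs.foldr (fun c r => PySem.List.insert r c v) r) := by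
  intro cs
  induction cs with
  | nil => intro G; simp
  | cons c cs' ih => intro G; simp [ih, List.map_map]

theorem pyGetD_zero_cons {α : Type} (x : α) (t : List α) (d : α) :
    PySem.List.pyGetD (x :: t) 0 d = x := by
  have : (0 : Int) = ((0 : Nat) : Int) := rfl
  rw [this, PySem.List.pyGetD_natCast]; rfl

-- inserting at a position ≥ 1 keeps element 0 of a nonempty list
theorem pyGetD_zero_insert {α : Type} (l : List α) (i : Int) (v : α) (d : α)
    (hi : 1 ≤ i) (hl : l ≠ []) :
    PySem.List.pyGetD (PySem.List.insert l i v) 0 d = PySem.List.pyGetD l 0 d := by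
  match l with
  | x :: t =>
    show PySem.List.pyGetD (PySem.List.insert (x :: t) i v) 0 d = _
    simp only [PySem.List.insert, PySem.List.sliceIndices]
    have hstep : ¬ ((1 : Int) < 0) := by omega
    simp only [hstep, if_false, if_neg (by omega : ¬ i < 0)]
    have h1 : 1 ≤ (min i ((x :: t).length : Int)).toNat := by
      simp only [List.length_cons]; omega
    obtain ⟨n, hn⟩ : ∃ n, (min i ((x :: t).length : Int)).toNat = n + 1 :=
      ⟨_, (Nat.succ_pred_eq_of_pos h1).symm⟩
    rw [hn]
    simp [List.take_succ_cons]

-- the blank row A builds from expanded_g_map[0] is the one built from g_map[0]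
theorem foldr_insert_headstable :
    ∀ (rs : List Int) (xs : List (List String)), rs.Pairwise (· < ·) →
      (∀ r ∈ rs, 0 ≤ r) → xs ≠ [] →
      rs.foldr (fun r acc => PySem.List.insert acc r
          ((List.range (PySem.List.pyGetD acc 0 []).length).map (fun _ => "."))) xs
      = rs.foldr (fun r acc => PySem.List.insert acc r
          ((List.range (PySem.List.pyGetD xs 0 []).length).map (fun _ => "."))) xs := by
  intro rs
  induction rs with
  | nil => intro xs _ _ _; rfl
  | cons r rs' ih =>
    intro xs hp h0 hne
    have hp' := (List.pairwise_cons.1 hp).2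
    have hlt := (List.pairwise_cons.1 hp).1
    have h0' : ∀ r' ∈ rs', 0 ≤ r' := fun r' h => h0 r' (List.mem_cons_of_mem _ h)
    -- element 0 survives the inner foldr: all its positions are > r ≥ 0
    have hstable : ∀ (ts : List Int) (w : List (List String) → List String),
        ∀ (_ : ∀ t' ∈ ts, 1 ≤ t') (zs : List (List String)), zs ≠ [] →
        (ts.foldr (fun t' acc => PySem.List.insert acc t' (w acc)) zs ≠ [] ∧
         PySem.List.pyGetD (ts.foldr (fun t' acc => PySem.List.insert acc t' (w acc)) zs) 0 []
           = PySem.List.pyGetD zs 0 []) := by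
      intro ts w
      induction ts with
      | nil => intro _ zs hzs; exact ⟨hzs, rfl⟩
      | cons t' ts' ih2 =>
        intro hts zs hzs
        have hts' : ∀ a ∈ ts', 1 ≤ a := fun a h => hts a (List.mem_cons_of_mem _ h)
        obtain ⟨hne2, heq2⟩ := ih2 hts' zs hzs
        refine ⟨?_, ?_⟩
        · intro hcontra
          rw [List.foldr_cons] at hcontra
          have hlen := PySem.List.length_insert
            (List.foldr (fun t' acc => PySem.List.insert acc t' (w acc)) zs ts') t'
            (w (List.foldr (fun t' acc => PySem.List.insert acc t' (w acc)) zs ts'))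
          rw [hcontra] at hlen
          simp at hlen
        · rw [List.foldr_cons,
            pyGetD_zero_insert _ _ _ _ (hts t' (List.mem_cons_self ..)) hne2, heq2]
    simp only [List.foldr_cons]
    rw [ih xs hp' h0' hne]
    congr 1
    have h1 : ∀ t' ∈ rs', 1 ≤ t' := by
      intro t' ht'; have := hlt t' ht'; have := h0 r (List.mem_cons_self ..); omega
    have := (hstable rs'
      (fun acc => ((List.range (PySem.List.pyGetD xs 0 []).length).map (fun _ => "."))) h1 xs hne).2
    rw [this]

-- enumerate over a map of range is explicit
theorem enum_range_map {α : Type} (m : Nat) (f : Nat → α) :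
    PySem.List.enumerate ((List.range m).map f) 0
      = (List.range m).map (fun k : Nat => ((k : Int), f k)) := by
  apply List.ext_getElem?
  intro i
  rw [PySem.List.getElem?_enumerate]
  by_cases hi : i < m
  · simp [hi]
  · simp [hi]

-- upper bound: every row is at least pvMinLen long
theorem pvMinLen_le (g : List (List String)) : ∀ r ∈ g, pvMinLen g ≤ r.length := by
  have haux : ∀ (l : List (List String)) (a : Nat),
      (l.foldl (fun a r' => min a r'.length) a) ≤ a ∧
      ∀ r' ∈ l, (l.foldl (fun a r' => min a r'.length) a) ≤ r'.length := by
    intro l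
    induction l with
    | nil => intro a; simp
    | cons x t ih =>
      intro a
      obtain ⟨h1, h2⟩ := ih (min a x.length)
      refine ⟨by simp only [List.foldl_cons]; omega, ?_⟩
      intro r' hr'
      simp only [List.foldl_cons]
      rcases List.mem_cons.1 hr' with rfl | hm
      · omega
      · exact h2 _ hm
  match g with
  | [] => intro r hr; simp at hr
  | r0 :: rs =>
    intro r hr
    obtain ⟨h1, h2⟩ := haux rs r0.length
    rcases List.mem_cons.1 hr with rfl | hm
    · exact h1
    · exact h2 _ hm

-- the shared predicate equality: set(r) == {"."}  ↔  r nonempty and all dots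
theorem set_equal_dot (r : List String) :
    PySem.Set.equal (PySem.Set.ofList r) (PySem.Set.ofList ["."]) = (!r.isEmpty && r.all (fun x => x == ".")) := by
  rw [Bool.eq_iff_iff]
  rw [PySem.Set.equal_iff]
  constructor
  · intro h
    have hdot : "." ∈ r := by
      have := (h ".").2; simp [PySem.Set.mem_ofList] at this; exact this
    have hall : ∀ x ∈ r, x = "." := by
      intro x hx
      have := (h x).1; simp [PySem.Set.mem_ofList] at this; exact this hx
    simp only [Bool.and_eq_true, List.all_eq_true]
    constructor
    · match r, hdot with
      | y :: t, _ => rfl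
    · intro x hx; simp [hall x hx]
  · intro h x
    simp only [Bool.and_eq_true, List.all_eq_true] at h
    obtain ⟨hne, hall⟩ := h
    simp only [PySem.Set.mem_ofList, List.mem_singleton]
    constructor
    · intro hx; have := hall x hx; simpa using this
    · intro hx
      subst hx
      match r, hne with
      | y :: t, _ =>
        have := hall y (List.mem_cons_self ..)
        simp at this
        rw [← this]; exact List.mem_cons_self ..

-- the if-then-some filterMap is map-of-filter
theorem filterMap_if_some {α β : Type} (p : α → Bool) (f : α → β) (l : List α) :
    l.filterMap (fun x => if p x then some (f x) else none) = (l.filter p).map f := by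
  induction l with
  | nil => rfl
  | cons x t ih =>
    by_cases h : p x <;> simp [h, ih]

-- A's append-loop over enumerate g and B's comprehension produce the same row list
theorem rows_eq (g : List (List String)) :
    (PySem.List.enumerate g 0).foldl
      (fun acc p => if PySem.Set.equal (PySem.Set.ofList p.2) (PySem.Set.ofList ["."]) then acc ++ [p.1] else acc) []
    = (PySem.List.enumerate g 0).filterMap
      (fun p => if !p.2.isEmpty && p.2.all (fun x => x == ".") then some p.1 else none) := by
  rw [PySem.List.foldl_append_if
    (fun p => PySem.Set.equal (PySem.Set.ofList p.2) (PySem.Set.ofList ["."])) Prod.fst, filterMap_if_some]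
  simp only [List.nil_append]
  congr 1
  apply List.filter_congr
  intro p _
  exact set_equal_dot p.2

-- ===== VERDICT helper facts =====

theorem rows_spec (g : List (List String)) :
    ((PySem.List.enumerate g 0).filterMap
      (fun p => if !p.2.isEmpty && p.2.all (fun x => x == ".") then some p.1 else none)).Pairwise (· < ·)
    ∧ ∀ i ∈ (PySem.List.enumerate g 0).filterMap
      (fun p => if !p.2.isEmpty && p.2.all (fun x => x == ".") then some p.1 else none),
        0 ≤ i ∧ i < (g.length : Int) := by
  rw [filterMap_if_some]
  constructor
  · rw [List.pairwise_map]
    exact ((PySem.List.pairwise_lt_enumerate g 0).filter _)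
  · intro i hi
    simp only [List.mem_map] at hi
    obtain ⟨p, hp, rfl⟩ := hi
    have := List.mem_of_mem_filter hp
    rw [PySem.List.mem_enumerate_iff] at this
    obtain ⟨k, hk, rfl⟩ := this
    simp; omega

theorem sorted_rev_of_pairwise (cs : List Int) (h : cs.Pairwise (· < ·)) :
    PySem.List.sorted cs (fun x => x) true = cs.reverse := by
  apply PySem.List.sorted_rev_eq_of_perm_of_pairwise_gt
  · exact List.reverse_perm cs
  · rw [List.pairwise_reverse]; exact h

theorem expand_g_map_spec' (g : List (List String)) :
    expand_g_map g = expand_g_map_alt g := by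
  match g with
  | [] => rfl
  | r0 :: G =>
    set g := r0 :: G with hg
    -- names
    set PB : List String → Bool := fun r => !r.isEmpty && r.all (fun x => x == ".") with hPB
    set rows : List Int := (PySem.List.enumerate g 0).filterMap
      (fun p => if PB p.2 then some p.1 else none) with hrows
    set m : Nat := pvMinLen g with hm
    set cols : List Int := (PySem.List.pyRange 0 (m : Int)).filter
      (fun j => g.all (fun r => PySem.List.pyGetD r j "" == ".")) with hcols
    set blank : List String := List.replicate r0.length "." with hblank
    obtain ⟨hrp, hrb⟩ := rows_spec g
    rw [← hrows] at hrp hrb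
    -- cols facts: cols = map cast of a filter of range m
    have hcols' : cols = ((List.range m).filter
        (fun k : Nat => g.all (fun r => PySem.List.pyGetD r ((k : Int)) "" == "."))).map (fun k : Nat => (k : Int)) := by
      rw [hcols, PySem.List.pyRange_zero_nat, List.filter_map]
      rfl
    have hcp : cols.Pairwise (· < ·) := by
      rw [hcols', List.pairwise_map]
      exact (List.pairwise_lt_range.filter _).imp (by intro a b h; exact_mod_cast h)
    have hcb : ∀ c ∈ cols, 0 ≤ c ∧ c < (m : Int) := by
      intro c hc
      rw [hcols'] at hc
      simp only [List.mem_map] at hc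
      obtain ⟨k, hk, rfl⟩ := hc
      have := List.mem_range.1 (List.mem_of_mem_filter hk)
      constructor <;> omega
    -- A's rows_to_expand = rows, A's cols_to_expand = cols
    have hA : is_that_need_expanding g = (rows, cols) := by
      unfold is_that_need_expanding
      refine Prod.ext ?_ ?_
      · rw [hrows, hPB]; exact rows_eq g
      · -- columns
        show (PySem.List.enumerate (pyZipStar "" g) 0).foldl _ [] = cols
        rw [PySem.List.foldl_append_if
          (fun p => PySem.Set.equal (PySem.Set.ofList p.2) (PySem.Set.ofList ["."])) Prod.fst]
        simp only [List.nil_append]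
        have hz : pyZipStar "" g = (List.range m).map (fun j => g.map (fun row => row.getD j "")) := by
          rw [hg, pyZipStar, ← hg, ← hm]
        rw [hz, enum_range_map, List.filter_map, List.map_map, hcols']
        have : ∀ k ∈ List.range m,
            ((fun p => PySem.Set.equal (PySem.Set.ofList p.2) (PySem.Set.ofList ["."])) ∘
              (fun k : Nat => (((k : Int)), g.map (fun row => row.getD k "")))) k
            = (fun k : Nat => g.all (fun r => PySem.List.pyGetD r ((k : Int)) "" == ".")) k := by
          intro k hk
          have hk' := List.mem_range.1 hk
          simp only [Function.comp_apply]
          rw [set_equal_dot]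
          have hlen : ∀ r ∈ g, k < r.length := by
            intro r hr; have := pvMinLen_le g r hr; rw [← hm] at this; omega
          rw [Bool.eq_iff_iff]
          simp only [Bool.and_eq_true, List.all_eq_true,
            Bool.not_eq_eq_eq_not]
          constructor
          · rintro ⟨-, hall⟩ r hr
            have := hall (r.getD k "") (List.mem_map_of_mem hr)
            rw [PySem.List.pyGetD_natCast]; exact this
          · intro hall
            refine ⟨by simp [hg], ?_⟩
            intro x hx
            rw [List.mem_map] at hx
            obtain ⟨r, hr, rfl⟩ := hx
            have := hall r hr
            rwa [PySem.List.pyGetD_natCast] at this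
        rw [List.filter_congr this]
        rfl
    -- unfold A
    show (let expanded₀ := g
      let rc := is_that_need_expanding expanded₀
      let expanded₁ := (PySem.List.sorted rc.1 (fun x => x) true).foldl
        (fun eg r => PySem.List.insert eg r
          ((List.range (PySem.List.pyGetD eg 0 []).length).map (fun _ => "."))) expanded₀
      let expanded₂ := (PySem.List.sorted rc.2 (fun x => x) true).foldl
        (fun eg c => eg.map (fun r => PySem.List.insert r c ".")) expanded₁
      expanded₂) = expand_g_map_alt g
    simp only [hA]
    rw [sorted_rev_of_pairwise rows hrp, sorted_rev_of_pairwise cols hcp,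
      List.foldl_reverse, List.foldl_reverse]
    -- rows phase
    have hgne : g ≠ [] := by simp [hg]
    rw [foldr_insert_headstable rows g hrp (fun r h => (hrb r h).1) hgne]
    have hblankA : ((List.range (PySem.List.pyGetD g 0 []).length).map (fun _ => ("." : String))) = blank := by
      rw [hg, pyGetD_zero_cons]
      rw [hblank]
      simp [List.map_const']
    rw [hblankA]
    rw [foldr_insert_wgen blank rows g hrp hrb]
    -- cols phase distributes then becomes wgen per row
    rw [foldr_map_insert "." cols _]
    have hrowlen : ∀ r ∈ wgen blank (fun i => rows.contains i) id 0 g, (m : Int) ≤ (r.length : Int) := by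
      intro r hr
      rcases mem_wgen blank (fun i => rows.contains i) 0 g r hr with rfl | hr'
      · have := pvMinLen_le g r0 (by rw [hg]; exact List.mem_cons_self ..)
        rw [← hm] at this
        rw [hblank]; simp; omega
      · have := pvMinLen_le g r hr'; rw [← hm] at this; exact_mod_cast this
    have hmapcols : (wgen blank (fun i => rows.contains i) id 0 g).map
        (fun r => cols.foldr (fun c r => PySem.List.insert r c ".") r)
        = (wgen blank (fun i => rows.contains i) id 0 g).map
        (fun r => wgen "." (fun i => cols.contains i) id 0 r) := by
      apply List.map_congr_left
      intro r hr
      exact foldr_insert_wgen "." cols r hcp (fun c hc => by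
        have h1 := hcb c hc
        have h2 := hrowlen r hr
        exact ⟨h1.1, by omega⟩)
    rw [hmapcols, map_wgen]
    -- B is the same wgen
    have hwiden : ∀ r : List String, pvWiden cols r = wgen "." (fun i => cols.contains i) id 0 r := by
      intro r
      exact (foldl_enum_wgen ("." : String) (fun i => cols.contains i) id r 0 []).trans
        (List.nil_append _)
    have hBout : expand_g_map_alt g = wgen (pvWiden cols blank) (fun i => rows.contains i)
        (fun r => pvWiden cols r) 0 g := by
      have h := foldl_enum_wgen (pvWiden cols blank) (fun i => rows.contains i)
        (fun r => pvWiden cols r) g 0 []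
      exact h.trans (List.nil_append _)
    rw [hBout]
    have hfun : (fun r => pvWiden cols r) = (fun r => wgen "." (fun i => cols.contains i) id 0 r) :=
      funext hwiden
    rw [hfun, hwiden blank]

-- ===== VERDICT (by name: the statement is the Claim_ definition above) =====
theorem expand_g_map_spec : Claim_equal_expand_g_map := by
  intro g _
  show expand_g_map g = expand_g_map_alt g
  exact expand_g_map_spec' g
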